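-- pv_equiv track=rewrite | github.com/nicevall/estructura_datos | semana_4/calcular_suma_pares_y_minimo_impares_normal.py | calcular_suma_pares_y_minimo_impares
-- ===== SOURCE A (Python) =====
-- def calcular_suma_pares_y_minimo_impares(lista):
--     pares = []
--     impares = []
--     for num in lista:
--         if num % 2 == 0:
--             pares.append(num)
--         else:
--             impares.append(num)
--
--     suma_pares = 0
--     for num in pares:
--         suma_pares += num
--
--     if impares:
--         minimo_impar = impares[0]
--         for num in impares:
--             if num < minimo_impar:
--                 minimo_impar = num
--     else:
--         minimo_impar = None
--
--     return suma_pares, minimo_impar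
-- ===== SOURCE B (Python) =====
-- def calcular_suma_pares_y_minimo_impares(lista):
--     suma_pares = 0
--     minimo_impar = None
--     for num in lista:
--         if num % 2 == 0:
--             suma_pares += num
--         elif minimo_impar is None or num < minimo_impar:
--             minimo_impar = num
--     return suma_pares, minimo_impar
-- ===== Notes on version B (the rewrite author's own statement) =====
-- stated objective: simpler
-- what changed: One fused pass maintaining a running even-sum and an Option-style odd-minimum, eliminating the two intermediate partition lists and the two follow-up passes.
import Mathlib
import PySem

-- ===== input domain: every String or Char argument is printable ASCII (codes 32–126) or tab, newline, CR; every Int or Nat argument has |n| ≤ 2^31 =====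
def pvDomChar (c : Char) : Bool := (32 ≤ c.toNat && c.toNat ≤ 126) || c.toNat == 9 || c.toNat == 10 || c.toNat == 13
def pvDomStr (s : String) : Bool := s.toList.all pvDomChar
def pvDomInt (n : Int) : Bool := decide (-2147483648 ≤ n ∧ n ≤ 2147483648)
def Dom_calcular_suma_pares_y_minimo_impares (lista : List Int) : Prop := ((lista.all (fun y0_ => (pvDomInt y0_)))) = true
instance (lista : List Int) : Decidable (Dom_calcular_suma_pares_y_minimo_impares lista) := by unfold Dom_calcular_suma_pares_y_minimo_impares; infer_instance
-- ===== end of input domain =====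

-- B replaces A's three passes (partition into two lists, sum pass, min pass) by one fused
-- pass keeping a running even-sum and an optional odd-minimum; objective: simpler.

-- ===== PORT A =====
-- A: partition into pares/impares, then sum the pares, then scan impares for the minimum.
def calcular_suma_pares_y_minimo_impares (lista : List Int) : Int × Option Int :=
  let pi := lista.foldl
    (fun (pi : List Int × List Int) num =>
      if PySem.Int.mod num 2 = 0 then (pi.1 ++ [num], pi.2) else (pi.1, pi.2 ++ [num]))
    ([], [])
  let pares := pi.1
  let impares := pi.2
  let suma_pares := pares.foldl (fun s num => s + num) 0
  let minimo_impar : Option Int :=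
    match impares with
    | [] => none
    | h :: _ => some (impares.foldl (fun m num => if num < m then num else m) h)
  (suma_pares, minimo_impar)

-- ===== PORT B =====
-- B: one loop, state = (running even sum, optional minimum odd so far).
def calcular_suma_pares_y_minimo_impares_alt (lista : List Int) : Int × Option Int :=
  lista.foldl
    (fun (st : Int × Option Int) num =>
      if PySem.Int.mod num 2 = 0 then (st.1 + num, st.2)
      else
        match st.2 with
        | none => (st.1, some num)
        | some m => if num < m then (st.1, some num) else (st.1, some m))
    (0, none)

-- ===== PRECONDITION & SPEC =====
def Spec_calcular_suma_pares_y_minimo_impares (lista : List Int) (out : Int × Option Int) : Prop := out = calcular_suma_pares_y_minimo_impares_alt lista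
instance (lista : List Int) (out : Int × Option Int) : Decidable (Spec_calcular_suma_pares_y_minimo_impares lista out) := by unfold Spec_calcular_suma_pares_y_minimo_impares; infer_instance

-- ===== CLAIM (what is proved, stated in full; the proofs are below) =====
def Claim_equal_calcular_suma_pares_y_minimo_impares : Prop := ∀ (lista : List Int), Dom_calcular_suma_pares_y_minimo_impares lista → Spec_calcular_suma_pares_y_minimo_impares lista (calcular_suma_pares_y_minimo_impares lista)

-- ===== LEMMAS AND PROOFS =====

def pvMinStep : Option Int → Int → Option Int
  | none, n => some n
  | some m, n => if n < m then some n else some m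

-- B's fold in named form
def pvBStep (st : Int × Option Int) (num : Int) : Int × Option Int :=
  if PySem.Int.mod num 2 = 0 then (st.1 + num, st.2)
  else
    match st.2 with
    | none => (st.1, some num)
    | some m => if num < m then (st.1, some num) else (st.1, some m)

lemma pvBStep_eq (s : Int) (o : Option Int) (num : Int) :
    pvBStep (s, o) num =
      if PySem.Int.mod num 2 = 0 then (s + num, o) else (s, pvMinStep o num) := by
  unfold pvBStep pvMinStep
  cases o with
  | none => rfl
  | some m =>
    by_cases h : PySem.Int.mod num 2 = 0
    · simp only [h, if_true]
    · simp only [h, if_false]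
      by_cases h2 : num < m <;> simp [h2]

lemma pvAlt_eq_fold (lista : List Int) :
    calcular_suma_pares_y_minimo_impares_alt lista = lista.foldl pvBStep (0, none) := rfl

-- A's partition fold yields (p ++ evens, i ++ odds)
lemma pvPart (lista : List Int) (p i : List Int) :
    lista.foldl
      (fun (pi : List Int × List Int) num =>
        if PySem.Int.mod num 2 = 0 then (pi.1 ++ [num], pi.2) else (pi.1, pi.2 ++ [num]))
      (p, i)
    = (p ++ lista.filter (fun n => decide (PySem.Int.mod n 2 = 0)),
       i ++ lista.filter (fun n => ! decide (PySem.Int.mod n 2 = 0))) := by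
  induction lista generalizing p i with
  | nil => simp
  | cons h t ih =>
    by_cases hm : PySem.Int.mod h 2 = 0
    · simp only [List.foldl_cons, hm, if_true, List.filter_cons, decide_true,
        Bool.not_true]
      rw [ih, List.append_assoc]
      rfl
    · simp only [List.foldl_cons, hm, if_false, List.filter_cons, decide_false,
        Bool.not_false, if_true]
      rw [ih, List.append_assoc]
      rfl

lemma pvFoldlAdd (l : List Int) (x : Int) :
    l.foldl (fun a b => a + b) x = x + l.foldl (fun a b => a + b) 0 := by
  induction l generalizing x with
  | nil => simp
  | cons h t ih =>
    simp only [List.foldl_cons]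
    rw [ih (x + h), ih (0 + h)]
    ring

lemma pvMinFold_some (t : List Int) (m : Int) :
    t.foldl pvMinStep (some m) = some (t.foldl (fun m num => if num < m then num else m) m) := by
  induction t generalizing m with
  | nil => rfl
  | cons h t ih =>
    simp only [List.foldl_cons, pvMinStep]
    split <;> exact ih _

lemma pvBfold (lista : List Int) (s : Int) (o : Option Int) :
    lista.foldl pvBStep (s, o) =
      (s + (lista.filter (fun n => decide (PySem.Int.mod n 2 = 0))).foldl (fun a b => a + b) 0,
       (lista.filter (fun n => ! decide (PySem.Int.mod n 2 = 0))).foldl pvMinStep o) := by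
  induction lista generalizing s o with
  | nil => simp
  | cons h t ih =>
    by_cases hm : PySem.Int.mod h 2 = 0
    · simp only [List.foldl_cons, pvBStep_eq, hm, if_true, List.filter_cons, decide_true,
        Bool.not_true]
      rw [ih, pvFoldlAdd _ (0 + h)]
      exact Prod.ext (by ring) rfl
    · simp only [List.foldl_cons, pvBStep_eq, hm, if_false, List.filter_cons, decide_false,
        Bool.not_false, if_true]
      rw [ih]
      rfl

-- ===== VERDICT (by name: the statement is the Claim_ definition above) =====
theorem calcular_suma_pares_y_minimo_impares_spec : Claim_equal_calcular_suma_pares_y_minimo_impares := by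
  intro lista _
  unfold Spec_calcular_suma_pares_y_minimo_impares
  show calcular_suma_pares_y_minimo_impares lista = _
  rw [pvAlt_eq_fold, pvBfold]
  unfold calcular_suma_pares_y_minimo_impares
  rw [pvPart]
  simp only [List.nil_append]
  refine Prod.ext ?_ ?_
  · exact (zero_add _).symm
  · show _ = (List.filter _ lista).foldl pvMinStep none
    cases hft : lista.filter (fun n => ! decide (PySem.Int.mod n 2 = 0)) with
    | nil => rfl
    | cons h t =>
      show (some _ : Option Int) = _
      simp only [List.foldl_cons, pvMinStep, pvMinFold_some]
      simp
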